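-- pv_equiv track=rewrite | github.com/aqrtf/ProjetBubbleID | Customizable/test2.py | count_ints_and_nones
-- ===== SOURCE A (Python) =====
-- def count_ints_and_nones(lst):
--     # indices des entiers
--     int_indices = [i for i, x in enumerate(lst) if isinstance(x, int)]
--     if not int_indices:
--         return 0, 0  # aucun entier
--
--     start, end = int_indices[0], int_indices[-1]
--     sublist = lst[start:end+1]
--
--     num_ints = sum(isinstance(x, int) for x in sublist)
--     num_nones = sum(x is None for x in sublist)
--
--     return num_ints, num_nones
-- ===== SOURCE B (Python) =====
-- def count_ints_and_nones(lst):
--     num_ints = 0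
--     num_nones = 0
--     pending = 0  # Nones seen since the last int
--     seen_first_int = False
--     for x in lst:
--         if isinstance(x, int):
--             num_ints += 1
--             num_nones += pending
--             pending = 0
--             seen_first_int = True
--         elif x is None and seen_first_int:
--             pending += 1
--     return num_ints, num_nones
-- ===== Notes on version B (the rewrite author's own statement) =====
-- stated objective: simpler
-- what changed: Replaces the build-index-list / slice / two-sum-passes pipeline with one single pass that keeps a count of pending Nones and commits it at each int, so no index list or sublist is materialised.
import Mathlib
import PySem

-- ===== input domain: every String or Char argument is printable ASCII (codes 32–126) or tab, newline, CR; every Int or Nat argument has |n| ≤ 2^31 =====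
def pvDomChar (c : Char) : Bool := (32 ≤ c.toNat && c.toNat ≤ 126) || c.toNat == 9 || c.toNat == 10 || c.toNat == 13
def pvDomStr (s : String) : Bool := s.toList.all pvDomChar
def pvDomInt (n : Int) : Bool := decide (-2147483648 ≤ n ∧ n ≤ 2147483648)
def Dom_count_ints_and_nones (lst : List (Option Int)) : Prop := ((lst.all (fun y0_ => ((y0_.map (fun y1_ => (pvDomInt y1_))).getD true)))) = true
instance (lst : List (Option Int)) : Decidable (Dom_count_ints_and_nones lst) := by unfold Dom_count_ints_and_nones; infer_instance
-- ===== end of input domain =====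

-- B replaces A's index-list/slice/two-sums pipeline by a single pass with a pending-None counter (simpler; no intermediate lists).


-- ===== PORT A =====
def count_ints_and_nones (lst : List (Option Int)) : Int × Int :=
  let int_indices := ((PySem.List.enumerate lst 0).filter (fun p => p.2.isSome)).map (fun p => p.1)
  if int_indices = [] then (0, 0)
  else
    let start := PySem.List.pyGetD int_indices 0 0        -- int_indices[0]; nonempty so never the default
    let e := PySem.List.pyGetD int_indices (-1) 0         -- int_indices[-1]; nonempty so never the default
    let sublist := PySem.List.slice lst (some start) (some (e + 1))
    (((sublist.countP Option.isSome : Nat) : Int), ((sublist.countP Option.isNone : Nat) : Int))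

-- ===== PORT B =====
def count_ints_and_nones_alt (lst : List (Option Int)) : Int × Int :=
  let s := lst.foldl
    (fun (st : Int × Bool × Int × Int) x =>
      let (ni, seen, nn, pending) := st
      match x with
      | some _ => (ni + 1, true, nn + pending, 0)
      | none => if seen then (ni, seen, nn, pending + 1) else st)
    (0, false, 0, 0)
  (s.1, s.2.2.1)

-- ===== PRECONDITION & SPEC =====
def Spec_count_ints_and_nones (lst : List (Option Int)) (out : Int × Int) : Prop := out = count_ints_and_nones_alt lst
instance (lst : List (Option Int)) (out : Int × Int) : Decidable (Spec_count_ints_and_nones lst out) := by unfold Spec_count_ints_and_nones; infer_instance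

-- ===== CLAIM (what is proved, stated in full; the proofs are below) =====
def Claim_equal_count_ints_and_nones : Prop := ∀ (lst : List (Option Int)), Dom_count_ints_and_nones lst → Spec_count_ints_and_nones lst (count_ints_and_nones lst)

-- ===== LEMMAS AND PROOFS =====

-- index list of A, with a generalized start offset
def idxA (l : List (Option Int)) (s : Int) : List Int :=
  ((PySem.List.enumerate l s).filter (fun p => p.2.isSome)).map (fun p => p.1)

-- index (from the cons head) of the LAST int of l (0 when no int)
def lastIdx : List (Option Int) → Nat
  | [] => 0
  | _ :: t => if t.any Option.isSome then lastIdx t + 1 else 0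

-- l trimmed of its trailing (and, when no int exists, all) Nones
def trimR : List (Option Int) → List (Option Int)
  | [] => []
  | x :: t => if t.any Option.isSome then x :: trimR t else (if x.isSome then [x] else [])

-- number of Nones of l occurring before l's last int (0 when no int)
def nbN : List (Option Int) → Nat
  | [] => 0
  | x :: t => if t.any Option.isSome then (if x.isNone then 1 else 0) + nbN t else 0

theorem idxA_nil (s : Int) : idxA [] s = [] := rfl

theorem idxA_cons (x : Option Int) (t : List (Option Int)) (s : Int) :
    idxA (x :: t) s = if x.isSome then s :: idxA t (s + 1) else idxA t (s + 1) := by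
  simp [idxA, PySem.List.enumerate_cons, List.filter]
  cases x <;> simp

theorem idxA_eq_nil_iff (l : List (Option Int)) (s : Int) :
    idxA l s = [] ↔ l.any Option.isSome = false := by
  induction l generalizing s with
  | nil => simp [idxA_nil]
  | cons x t ih =>
    rw [idxA_cons]
    cases x <;> simp [ih]

theorem idxA_head? (l : List (Option Int)) (s : Int) (h : l.any Option.isSome = true) :
    (idxA l s).head? = some (s + ((l.takeWhile Option.isNone).length : Int)) := by
  induction l generalizing s with
  | nil => simp at h
  | cons x t ih =>
    rw [idxA_cons]
    cases x with
    | some v => simp [List.takeWhile]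
    | none =>
      simp only [Option.isSome_none, if_neg Bool.false_ne_true]
      simp only [List.any_cons, Option.isSome_none, Bool.false_or] at h
      rw [ih (s + 1) h]
      simp [List.takeWhile]
      push_cast
      ring

theorem idxA_getLast? (l : List (Option Int)) (s : Int) (h : l.any Option.isSome = true) :
    (idxA l s).getLast? = some (s + (lastIdx l : Int)) := by
  induction l generalizing s with
  | nil => simp at h
  | cons x t ih =>
    rw [idxA_cons]
    by_cases ht : t.any Option.isSome = true
    · have hne : idxA t (s + 1) ≠ [] := by
        intro hnil; rw [idxA_eq_nil_iff] at hnil; simp [hnil] at ht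
      have hlast := ih (s + 1) ht
      cases x with
      | some v =>
        simp only [Option.isSome_some, reduceIte]
        rw [show (s :: idxA t (s + 1)) = [s] ++ idxA t (s + 1) from rfl,
          List.getLast?_append_of_ne_nil _ hne, hlast, lastIdx, if_pos ht]
        push_cast; ring_nf
      | none =>
        simp only [Option.isSome_none, Bool.false_eq_true, reduceIte]
        rw [hlast, lastIdx, if_pos ht]
        push_cast; ring_nf
    · have hxs : x.isSome = true := by
        cases x
        · simp only [List.any_cons, Option.isSome_none, Bool.false_or] at h; exact absurd h ht
        · rfl
      have hnil : idxA t (s + 1) = [] := by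
        rw [idxA_eq_nil_iff]; exact Bool.eq_false_iff.mpr ht
      rw [if_pos hxs, hnil]
      simp [lastIdx, Bool.eq_false_iff.mpr ht]

theorem drop_takeWhile_length (l : List (Option Int)) :
    l.drop (l.takeWhile Option.isNone).length = l.dropWhile Option.isNone := by
  induction l with
  | nil => rfl
  | cons x t ih =>
    cases x with
    | some v => simp [List.takeWhile, List.dropWhile]
    | none => simpa [List.takeWhile, List.dropWhile] using ih

theorem lastIdx_split (l : List (Option Int)) (h : l.any Option.isSome = true) :
    lastIdx l = (l.takeWhile Option.isNone).length + lastIdx (l.dropWhile Option.isNone) := by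
  induction l with
  | nil => simp at h
  | cons x t ih =>
    cases x with
    | some v => simp [List.takeWhile, List.dropWhile]
    | none =>
      simp only [List.any_cons, Option.isSome_none, Bool.false_or] at h
      simp [List.takeWhile, List.dropWhile, lastIdx, h, ih h]
      omega

theorem take_lastIdx (l : List (Option Int)) (h : l.any Option.isSome = true) :
    l.take (lastIdx l + 1) = trimR l := by
  induction l with
  | nil => simp at h
  | cons x t ih =>
    by_cases ht : t.any Option.isSome = true
    · rw [lastIdx, if_pos ht, trimR, if_pos ht, List.take_succ_cons, ih ht]
    · have hxs : x.isSome = true := by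
        cases x
        · simp only [List.any_cons, Option.isSome_none, Bool.false_or] at h; exact absurd h ht
        · rfl
      rw [lastIdx, if_neg ht, trimR, if_neg ht, if_pos hxs]
      simp

theorem countP_isSome_trimR (l : List (Option Int)) :
    (trimR l).countP Option.isSome = l.countP Option.isSome := by
  induction l with
  | nil => rfl
  | cons x t ih =>
    rw [trimR]
    by_cases ht : t.any Option.isSome = true
    · simp [ht, List.countP_cons, ih]
    · have h0 : t.countP Option.isSome = 0 := by
        rw [List.countP_eq_zero]
        intro a ha hs
        exact absurd (List.any_eq_true.mpr ⟨a, ha, hs⟩) ht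
      cases x <;> simp [ht, List.countP_cons, h0]

theorem countP_isNone_trimR (l : List (Option Int)) :
    (trimR l).countP Option.isNone = nbN l := by
  induction l with
  | nil => rfl
  | cons x t ih =>
    rw [trimR, nbN]
    by_cases ht : t.any Option.isSome = true
    · cases x <;> simp [ht, List.countP_cons, ih] <;> omega
    · cases x <;> simp [ht]

theorem countP_isSome_dropWhile (l : List (Option Int)) :
    (l.dropWhile Option.isNone).countP Option.isSome = l.countP Option.isSome := by
  induction l with
  | nil => rfl
  | cons x t ih =>
    cases x with
    | some v => simp [List.dropWhile]
    | none => simp [List.dropWhile, List.countP_cons, ih]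

theorem any_dropWhile (l : List (Option Int)) :
    (l.dropWhile Option.isNone).any Option.isSome = l.any Option.isSome := by
  induction l with
  | nil => rfl
  | cons x t ih =>
    cases x with
    | some v => simp [List.dropWhile]
    | none => simp [List.dropWhile, ih]

theorem A_unfold (l : List (Option Int)) :
    count_ints_and_nones l =
      if idxA l 0 = [] then ((0 : Int), (0 : Int))
      else
        (((PySem.List.slice l (some (PySem.List.pyGetD (idxA l 0) 0 0))
            (some (PySem.List.pyGetD (idxA l 0) (-1) 0 + 1))).countP Option.isSome : Int),
         ((PySem.List.slice l (some (PySem.List.pyGetD (idxA l 0) 0 0))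
            (some (PySem.List.pyGetD (idxA l 0) (-1) 0 + 1))).countP Option.isNone : Int)) := rfl

-- characterization of A
theorem A_char (l : List (Option Int)) :
    count_ints_and_nones l =
      if l.any Option.isSome = true then
        ((l.countP Option.isSome : Int), ((nbN (l.dropWhile Option.isNone) : Nat) : Int))
      else (0, 0) := by
  by_cases h : l.any Option.isSome = true
  · rw [if_pos h]
    have hne : idxA l 0 ≠ [] := by
      intro hnil; rw [idxA_eq_nil_iff] at hnil; simp [hnil] at h
    have hh := idxA_head? l 0 h
    have hl := idxA_getLast? l 0 h
    rw [A_unfold, if_neg hne]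
    have hstart : PySem.List.pyGetD (idxA l 0) 0 0 = ((l.takeWhile Option.isNone).length : Int) := by
      rw [PySem.List.pyGetD_zero]
      cases hidx : idxA l 0 with
      | nil => exact absurd hidx hne
      | cons a m => rw [hidx] at hh; simp at hh; simpa using hh
    have hend : PySem.List.pyGetD (idxA l 0) (-1) 0 = ((lastIdx l : Nat) : Int) := by
      rw [PySem.List.pyGetD_neg_one _ _ hne, ← Option.some_inj, ← List.getLast?_eq_getLast, hl]
      simp
    rw [hstart, hend]
    have hslice :
        PySem.List.slice l (some ((l.takeWhile Option.isNone).length : Int)) (some (((lastIdx l : Nat) : Int) + 1)) =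
          trimR (l.dropWhile Option.isNone) := by
      have : (((lastIdx l : Nat) : Int) + 1) = (((lastIdx l + 1 : Nat) : Nat) : Int) := by push_cast; ring
      rw [this, PySem.List.slice_natCast, drop_takeWhile_length]
      have hsplit := lastIdx_split l h
      have hsub : lastIdx l + 1 - (l.takeWhile Option.isNone).length
          = lastIdx (l.dropWhile Option.isNone) + 1 := by omega
      rw [hsub, take_lastIdx _ (by rw [any_dropWhile]; exact h)]
    rw [hslice, countP_isSome_trimR, countP_isNone_trimR, countP_isSome_dropWhile]
  · rw [if_neg h]
    have hnil : idxA l 0 = [] := by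
      rw [idxA_eq_nil_iff]; exact Bool.eq_false_iff.mpr h
    rw [A_unfold, if_pos hnil]

-- B's loop body
def stepB (st : Int × Bool × Int × Int) (x : Option Int) : Int × Bool × Int × Int :=
  let (ni, seen, nn, pending) := st
  match x with
  | some _ => (ni + 1, true, nn + pending, 0)
  | none => if seen then (ni, seen, nn, pending + 1) else st

theorem foldB_seen (l : List (Option Int)) :
    ∀ (ni nn p : Int), ∃ q : Int,
      l.foldl stepB (ni, true, nn, p) =
        (ni + (l.countP Option.isSome : Int), true,
         nn + (if l.any Option.isSome = true then p + (nbN l : Int) else 0), q) := by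
  induction l with
  | nil => intro ni nn p; exact ⟨p, by simp⟩
  | cons x t ih =>
    intro ni nn p
    cases x with
    | some v =>
      obtain ⟨q, hq⟩ := ih (ni + 1) (nn + p) 0
      refine ⟨q, ?_⟩
      rw [List.foldl_cons]
      show t.foldl stepB (ni + 1, true, nn + p, 0) = _
      rw [hq, nbN]
      by_cases ht : t.any Option.isSome = true
      · simp [ht, List.countP_cons] <;> omega
      · simp [ht, List.countP_cons] <;> omega
    | none =>
      obtain ⟨q, hq⟩ := ih ni nn (p + 1)
      refine ⟨q, ?_⟩
      rw [List.foldl_cons]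
      show t.foldl stepB (ni, true, nn, p + 1) = _
      rw [hq, nbN]
      by_cases ht : t.any Option.isSome = true
      · simp [ht, List.countP_cons] <;> omega
      · simp [ht, List.countP_cons] <;> omega

theorem B_char (l : List (Option Int)) :
    count_ints_and_nones_alt l =
      if l.any Option.isSome = true then
        ((l.countP Option.isSome : Int), ((nbN (l.dropWhile Option.isNone) : Nat) : Int))
      else (0, 0) := by
  induction l with
  | nil => rfl
  | cons x t ih =>
    cases x with
    | none =>
      have : count_ints_and_nones_alt (none :: t) = count_ints_and_nones_alt t := by
        simp [count_ints_and_nones_alt, List.foldl_cons]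
      rw [this, ih]
      simp [List.dropWhile, List.countP_cons]
    | some v =>
      show (let s := t.foldl stepB (stepB (0, false, 0, 0) (some v)); (s.1, s.2.2.1)) = _
      obtain ⟨q, hq⟩ := foldB_seen t 1 0 0
      show (let s := t.foldl stepB (1, true, 0, 0); (s.1, s.2.2.1)) = _
      rw [show t.foldl stepB (1, true, 0, 0) = _ from hq]
      simp only [List.any_cons, Option.isSome_some, Bool.true_or, if_pos rfl,
        List.dropWhile_cons]
      simp only [Option.isNone_some, Bool.false_eq_true, reduceIte]
      simp only [nbN]
      by_cases ht : t.any Option.isSome = true <;>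
        simp [ht, List.countP_cons] <;> push_cast <;> ring_nf

-- ===== VERDICT (by name: the statement is the Claim_ definition above) =====
theorem count_ints_and_nones_spec : Claim_equal_count_ints_and_nones := by
  intro lst _
  show count_ints_and_nones lst = count_ints_and_nones_alt lst
  rw [A_char, B_char]
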